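-- pv_equiv track=rewrite | github.com/Aramushaa/Smart-Tennis-Field | services/har_service/evaluate_model.py | select_windows_round_robin
-- ===== SOURCE A (Python) =====
-- def select_windows_round_robin(
--     windows_by_stream: list[tuple[str | None, str | None, list[list[dict]]]],
--     max_windows: int,
-- ) -> list[tuple[str | None, str | None, int, list[dict], int, int]]:
--     """
--     Spread the evaluation budget across recordings instead of exhausting the first
--     recording that has enough windows.
--
--     Returns tuples:
--       (recording_id, device, original_window_index, window, total_windows_for_stream, selected_count_for_stream)
--     """
--     selected: list[tuple[str | None, str | None, int, list[dict], int, int]] = []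
--     selected_counts: dict[tuple[str | None, str | None], int] = {
--         (recording_id, device): 0 for recording_id, device, _ in windows_by_stream
--     }
--
--     next_idx = 0
--     while len(selected) < max_windows:
--         progress = False
--         for recording_id, device, windows in windows_by_stream:
--             if next_idx >= len(windows):
--                 continue
--
--             stream_key = (recording_id, device)
--             selected_counts[stream_key] += 1
--             selected.append(
--                 (
--                     recording_id,
--                     device,
--                     next_idx,
--                     windows[next_idx],
--                     len(windows),
--                     selected_counts[stream_key],
--                 )
--             )
--             progress = True
--
--             if len(selected) >= max_windows:
--                 break
--
--         if not progress:
--             break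
--
--         next_idx += 1
--
--     return selected
-- ===== SOURCE B (Python) =====
-- def select_windows_round_robin(
--     windows_by_stream,
--     max_windows,
-- ):
--     """Bucket the windows by their index (a distribution sort), concatenate the
--     buckets in index order -- that IS the round-robin order -- slice off the
--     budget, then recompute the per-stream running counts in one final pass."""
--     maxlen = max((len(ws) for _, _, ws in windows_by_stream), default=0)
--     buckets = [[] for _ in range(maxlen)]
--     for rid, dev, ws in windows_by_stream:
--         total = len(ws)
--         for i, w in enumerate(ws):
--             buckets[i].append((rid, dev, i, w, total))
--     flat = [e for b in buckets for e in b]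
--     chosen = flat[:max_windows] if max_windows > 0 else []
--     counts = {}
--     out = []
--     for rid, dev, i, w, total in chosen:
--         key = (rid, dev)
--         c = counts.get(key, 0) + 1
--         counts[key] = c
--         out.append((rid, dev, i, w, total, c))
--     return out
-- ===== Notes on version B (the rewrite author's own statement) =====
-- stated objective: alternative
-- what changed: Replaces the budgeted round-by-round rescan (while-loop with a progress flag and a live counter dict) by a distribution sort: bucket every window by its index in one pass over the input, concatenate the buckets, slice off the budget, and recompute the per-stream counts in one final pass over the truncated selection.
import Mathlib
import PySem

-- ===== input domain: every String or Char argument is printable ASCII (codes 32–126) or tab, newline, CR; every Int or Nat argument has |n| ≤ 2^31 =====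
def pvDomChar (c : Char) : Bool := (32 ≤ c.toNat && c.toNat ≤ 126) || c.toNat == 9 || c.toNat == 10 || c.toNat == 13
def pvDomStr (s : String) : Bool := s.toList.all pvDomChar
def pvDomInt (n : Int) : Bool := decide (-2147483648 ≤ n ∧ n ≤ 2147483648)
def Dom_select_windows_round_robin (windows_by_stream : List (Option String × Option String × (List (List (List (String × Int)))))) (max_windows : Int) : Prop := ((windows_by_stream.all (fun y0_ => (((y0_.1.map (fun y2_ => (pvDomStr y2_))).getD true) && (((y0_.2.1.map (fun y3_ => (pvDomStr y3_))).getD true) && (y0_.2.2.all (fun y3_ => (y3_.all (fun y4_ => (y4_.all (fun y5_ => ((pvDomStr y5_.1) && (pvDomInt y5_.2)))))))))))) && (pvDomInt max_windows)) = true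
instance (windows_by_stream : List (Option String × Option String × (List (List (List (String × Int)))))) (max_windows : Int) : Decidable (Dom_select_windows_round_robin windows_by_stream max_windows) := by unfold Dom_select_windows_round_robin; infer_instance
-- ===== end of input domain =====

-- B replaces A's budgeted round-by-round rescan by a distribution sort: one pass buckets
-- every window by its index, the buckets are concatenated, the budget is sliced off, and
-- the per-stream counts are recomputed in one final pass.

-- type abbreviations shared by both ports (a window is a list of dicts)
abbrev pvWin : Type := List (List (String × Int))
abbrev pvStream : Type := Option String × Option String × List pvWin
abbrev pvKey : Type := Option String × Option String
abbrev pvOut : Type := Option String × Option String × Int × pvWin × Int × Int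
-- a bucketed entry of B: (recording_id, device, index, window, total) — no count yet
abbrev pvE : Type := Option String × Option String × Int × pvWin × Int

-- fuel for A's outer while-loop (a termination artifact of the port, not of the Python):
-- one round per window index, plus one; the loop stops by itself within that many rounds
def pvMaxLen (wbs : List pvStream) : Nat := wbs.foldl (fun m s => Nat.max m s.2.2.length) 0

-- ===== PORT A =====
-- the inner `for` loop: skips streams with next_idx out of range, appends otherwise,
-- breaks when the budget is reached; carries the `progress` flag
def pvInnerA (max_windows : Int) : List pvStream → PySem.Dict pvKey Int → List pvOut → Nat → Bool → (PySem.Dict pvKey Int × List pvOut × Bool)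
  | [], c, sel, _, prog => (c, sel, prog)
  | (rid, dev, ws) :: rest, c, sel, nidx, prog =>
    if ws.length ≤ nidx then pvInnerA max_windows rest c sel nidx prog
    else
      -- selected_counts[stream_key] += 1  (the key is always present; d[k] += 1 is modify k 0 (·+1) here)
      let c' := (c.modify (rid, dev) 0 (· + 1))
      let sel' := sel ++ [(rid, dev, (nidx : Int), ws.getD nidx [], (ws.length : Int), c'.getD (rid, dev) 0)]
      if max_windows ≤ (sel'.length : Int) then (c', sel', true)
      else pvInnerA max_windows rest c' sel' nidx true

-- the outer `while len(selected) < max_windows` loop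
def pvOuterA (streams : List pvStream) (max_windows : Int) : Nat → PySem.Dict pvKey Int → List pvOut → Nat → List pvOut
  | 0, _, sel, _ => sel
  | fuel + 1, c, sel, nidx =>
    if (sel.length : Int) < max_windows then
      let r := pvInnerA max_windows streams c sel nidx false
      if r.2.2 = false then r.2.1
      else pvOuterA streams max_windows fuel r.1 r.2.1 (nidx + 1)
    else sel

def select_windows_round_robin (windows_by_stream : List (Option String × Option String × (List (List (List (String × Int)))))) (max_windows : Int) : List (Option String × Option String × Int × (List (List (String × Int))) × Int × Int) :=
  -- selected_counts = {(rid, dev): 0 for ...}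
  let counts := windows_by_stream.foldl (fun d s => d.insert (s.1, s.2.1) 0) PySem.Dict.empty
  pvOuterA windows_by_stream max_windows (pvMaxLen windows_by_stream + 1) counts [] 0

-- ===== PORT B =====
-- maxlen = max((len(ws) for ...), default=0): lengths are ≥ 0, so the running max from 0 is exact
def pvMaxLenB (wbs : List pvStream) : Nat := (wbs.map (fun s => s.2.2.length)).foldl Nat.max 0

-- the per-stream bucketing loop: for i, w in enumerate(ws): buckets[i].append(...)
-- (buckets[i] read/written positionally; i < len(buckets) always holds, so getD/set is exact)
def pvAddStream (bk : List (List pvE)) (s : pvStream) : List (List pvE) :=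
  (PySem.List.enumerate s.2.2 0).foldl
    (fun bk iw => bk.set iw.1.toNat (bk.getD iw.1.toNat [] ++ [(s.1, s.2.1, iw.1, iw.2, (s.2.2.length : Int))])) bk

-- the final pass: counts.get(key, 0) + 1, store it, append the completed tuple
def pvRecount : PySem.Dict pvKey Int → List pvE → List pvOut → PySem.Dict pvKey Int × List pvOut
  | c, [], out => (c, out)
  | c, (rid, dev, i, w, total) :: t, out =>
    let cnt := c.getD (rid, dev) 0 + 1
    pvRecount (c.insert (rid, dev) cnt) t (out ++ [(rid, dev, i, w, total, cnt)])

def select_windows_round_robin_alt (windows_by_stream : List (Option String × Option String × (List (List (List (String × Int)))))) (max_windows : Int) : List (Option String × Option String × Int × (List (List (String × Int))) × Int × Int) :=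
  let maxlen := pvMaxLenB windows_by_stream
  let buckets := windows_by_stream.foldl pvAddStream (List.replicate maxlen ([] : List pvE))
  let flat := buckets.foldl (fun acc b => acc ++ b) ([] : List pvE)
  let chosen := if 0 < max_windows then PySem.List.slice flat none (some max_windows) else []
  (pvRecount PySem.Dict.empty chosen []).2

-- ===== PRECONDITION & SPEC =====
def Spec_select_windows_round_robin (windows_by_stream : List (Option String × Option String × (List (List (List (String × Int)))))) (max_windows : Int) (out : List (Option String × Option String × Int × (List (List (String × Int))) × Int × Int)) : Prop := out = select_windows_round_robin_alt windows_by_stream max_windows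
-- instance search times out on this deeply nested product type; assemble the instance by hand
def pvDecEqOut : DecidableEq pvOut :=
  @instDecidableEqProd _ _ _ (@instDecidableEqProd _ _ _
    (inferInstance : DecidableEq (Int × List (List (String × Int)) × Int × Int)))
instance (windows_by_stream : List (Option String × Option String × (List (List (List (String × Int)))))) (max_windows : Int) (out : List (Option String × Option String × Int × (List (List (String × Int))) × Int × Int)) : Decidable (Spec_select_windows_round_robin windows_by_stream max_windows out) := by unfold Spec_select_windows_round_robin; exact @instDecidableEqList _ pvDecEqOut out _

-- ===== CLAIM (what is proved, stated in full; the proofs are below) =====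
def Claim_equal_select_windows_round_robin : Prop := ∀ (windows_by_stream : List (Option String × Option String × (List (List (List (String × Int)))))) (max_windows : Int), Dom_select_windows_round_robin windows_by_stream max_windows → Spec_select_windows_round_robin windows_by_stream max_windows (select_windows_round_robin windows_by_stream max_windows)

-- ===== LEMMAS AND PROOFS =====

-- round i: the entries all active streams contribute at window index i, in stream order
def pvRound (l : List pvStream) (i : Nat) : List pvE :=
  (l.filter (fun s => decide (i < s.2.2.length))).map
    (fun s => (s.1, s.2.1, (i : Int), s.2.2.getD i [], (s.2.2.length : Int)))

-- rounds nidx, nidx+1, …, nidx+fuel-1 concatenated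
def pvTail (streams : List pvStream) : Nat → Nat → List pvE
  | 0, _ => []
  | fuel + 1, nidx => pvRound streams nidx ++ pvTail streams fuel (nidx + 1)

theorem pvRecount_length (l : List pvE) :
    ∀ c out, (pvRecount c l out).2.length = out.length + l.length := by
  induction l with
  | nil => intro c out; simp [pvRecount]
  | cons e t ih =>
    intro c out; rcases e with ⟨rid, dev, i, w, total⟩
    simp [pvRecount, ih]; omega

theorem pvRecount_append (l1 l2 : List pvE) :
    ∀ c out, pvRecount c (l1 ++ l2) out
      = pvRecount (pvRecount c l1 out).1 l2 (pvRecount c l1 out).2 := by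
  induction l1 with
  | nil => intro c out; simp [pvRecount]
  | cons e t ih =>
    intro c out; rcases e with ⟨rid, dev, i, w, total⟩
    simp only [List.cons_append, pvRecount]
    exact ih _ _

-- the inner for-loop of A is: recount the first (budget left) entries of round nidx
theorem pvInnerA_eq (m : Int) :
    ∀ (l : List pvStream) (c c2 : PySem.Dict pvKey Int) (sel : List pvOut) (nidx : Nat) (prog : Bool),
      (sel.length : Int) < m →
      (∀ k, c.getD k 0 = c2.getD k 0) →
      (pvInnerA m l c sel nidx prog).2.1
          = (pvRecount c2 ((pvRound l nidx).take (m - sel.length).toNat) sel).2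
      ∧ (∀ k, (pvInnerA m l c sel nidx prog).1.getD k 0
          = (pvRecount c2 ((pvRound l nidx).take (m - sel.length).toNat) sel).1.getD k 0)
      ∧ (pvInnerA m l c sel nidx prog).2.2 = (prog || !(pvRound l nidx).isEmpty) := by
  intro l
  induction l with
  | nil =>
    intro c c2 sel nidx prog hlt hc
    refine ⟨by simp [pvInnerA, pvRound, pvRecount], fun k => by simpa [pvInnerA, pvRound, pvRecount] using hc k, by simp [pvInnerA, pvRound]⟩
  | cons s t ih =>
    intro c c2 sel nidx prog hlt hc
    rcases s with ⟨rid, dev, ws⟩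
    by_cases hlen : nidx < ws.length
    · -- active head: round nidx = entry :: round of the tail
      have hr : pvRound ((rid, dev, ws) :: t) nidx
          = (rid, dev, (nidx : Int), ws.getD nidx [], (ws.length : Int)) :: pvRound t nidx := by
        simp [pvRound, hlen]
      have hk1 : 1 ≤ (m - (sel.length : Int)).toNat := by omega
      have htake : ((pvRound ((rid, dev, ws) :: t) nidx).take (m - (sel.length : Int)).toNat)
          = (rid, dev, (nidx : Int), ws.getD nidx [], (ws.length : Int))
            :: ((pvRound t nidx).take ((m - (sel.length : Int)).toNat - 1)) := by
        rw [hr]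
        rw [show (m - (sel.length : Int)).toNat = ((m - (sel.length : Int)).toNat - 1) + 1 from by omega]
        rfl
      have hcnt : ((c.modify (rid, dev) 0 (· + 1)).getD (rid, dev) 0) = c2.getD (rid, dev) 0 + 1 := by
        rw [PySem.Dict.getD_modify_self, hc]
      have hcinv : ∀ k, (c.modify (rid, dev) 0 (· + 1)).getD k 0
          = (c2.insert (rid, dev) (c2.getD (rid, dev) 0 + 1)).getD k 0 := by
        intro k
        rw [PySem.Dict.getD_modify, PySem.Dict.getD_insert]
        split <;> simp [hc]
      rw [htake]
      simp only [pvInnerA, if_neg (Nat.not_le.mpr hlen), pvRecount, hcnt]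
      by_cases hfull : m ≤ (((sel ++ [(rid, dev, (nidx : Int), ws.getD nidx [],
          (ws.length : Int), c2.getD (rid, dev) 0 + 1)]).length : Nat) : Int)
      · -- budget reached: A breaks; exactly one entry was taken
        have hsel1 : ((sel ++ [(rid, dev, (nidx : Int), ws.getD nidx [],
            (ws.length : Int), c2.getD (rid, dev) 0 + 1)]).length : Int) = (sel.length : Int) + 1 := by
          simp
        have hk0 : (m - (sel.length : Int)).toNat - 1 = 0 := by
          rw [hsel1] at hfull; omega
        rw [if_pos (by simpa [hcnt] using hfull), hk0]
        simp only [List.take_zero, pvRecount]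
        exact ⟨trivial, fun k => hcinv k, by rw [hr]; simp⟩
      · rw [if_neg (by simpa [hcnt] using hfull)]
        have hlt' : (((sel ++ [(rid, dev, (nidx : Int), ws.getD nidx [],
            (ws.length : Int), c2.getD (rid, dev) 0 + 1)]).length : Nat) : Int) < m := by
          omega
        obtain ⟨h1, h2, h3⟩ := ih (c.modify (rid, dev) 0 (· + 1))
          (c2.insert (rid, dev) (c2.getD (rid, dev) 0 + 1))
          (sel ++ [(rid, dev, (nidx : Int), ws.getD nidx [],
            (ws.length : Int), c2.getD (rid, dev) 0 + 1)]) nidx true hlt' hcinv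
        have hkk : (m - ((sel ++ [(rid, dev, (nidx : Int), ws.getD nidx [],
            (ws.length : Int), c2.getD (rid, dev) 0 + 1)]).length : Int)).toNat
            = (m - (sel.length : Int)).toNat - 1 := by
          simp only [List.length_append, List.length_cons, List.length_nil]
          push_cast
          omega
        rw [hkk] at h1 h2
        refine ⟨h1, h2, by rw [hr]; simpa using h3⟩
    · -- exhausted head: both sides skip it
      have hr : pvRound ((rid, dev, ws) :: t) nidx = pvRound t nidx := by
        simp [pvRound, hlen]
      simp only [pvInnerA, if_pos (Nat.le_of_not_lt hlen), hr]
      exact ih c c2 sel nidx prog hlt hc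

-- an empty round stays empty at later indices
theorem pvRound_nil_mono (l : List pvStream) (nidx : Nat) (h : pvRound l nidx = []) :
    ∀ j, nidx ≤ j → pvRound l j = [] := by
  intro j hj
  unfold pvRound at *
  simp only [List.map_eq_nil_iff, List.filter_eq_nil_iff] at *
  intro s hs
  have := h s hs
  simp at this ⊢
  omega

theorem pvTail_nil (l : List pvStream) (nidx : Nat) (h : pvRound l nidx = []) :
    ∀ fuel n, nidx ≤ n → pvTail l fuel n = [] := by
  intro fuel
  induction fuel with
  | zero => intro n _; rfl
  | succ f ih =>
    intro n hn
    simp only [pvTail, pvRound_nil_mono l nidx h n hn, List.nil_append]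
    exact ih (n + 1) (by omega)

-- the outer while-loop of A is: recount the first (budget left) entries of the remaining rounds
theorem pvOuterA_eq (streams : List pvStream) (m : Int) :
    ∀ fuel (c c2 : PySem.Dict pvKey Int) sel (nidx : Nat),
      (∀ k, c.getD k 0 = c2.getD k 0) →
      pvOuterA streams m fuel c sel nidx
        = (pvRecount c2 ((pvTail streams fuel nidx).take (m - sel.length).toNat) sel).2 := by
  intro fuel
  induction fuel with
  | zero => intro c c2 sel nidx hc; simp [pvOuterA, pvTail, pvRecount]
  | succ f ih =>
    intro c c2 sel nidx hc
    by_cases hlt : (sel.length : Int) < m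
    · obtain ⟨h1, h2, h3⟩ := pvInnerA_eq m streams c c2 sel nidx false hlt hc
      by_cases hR : pvRound streams nidx = []
      · -- no stream is active: A stops; all remaining rounds are empty
        have hflag : (pvInnerA m streams c sel nidx false).2.2 = false := by
          rw [h3, hR]; simp
        have htail : pvTail streams (f + 1) nidx = [] :=
          pvTail_nil streams nidx hR (f + 1) nidx le_rfl
        simp only [pvOuterA, if_pos hlt, hflag]
        rw [h1, hR, htail]
        simp [pvRecount]
      · -- an active round on both sides
        have hflag : (pvInnerA m streams c sel nidx false).2.2 = true := by
          rw [h3]; simpa using hR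
        simp only [pvOuterA, if_pos hlt, hflag]
        rw [if_neg (by simp)]
        rw [ih (pvInnerA m streams c sel nidx false).1
              (pvRecount c2 ((pvRound streams nidx).take (m - (sel.length : Int)).toNat) sel).1
              (pvInnerA m streams c sel nidx false).2.1 (nidx + 1) h2]
        rw [h1]
        have hamt : (m - (((pvRecount c2 ((pvRound streams nidx).take (m - (sel.length : Int)).toNat) sel).2.length : Nat) : Int)).toNat
            = (m - (sel.length : Int)).toNat - (pvRound streams nidx).length := by
          rw [pvRecount_length, List.length_take]
          push_cast
          omega
        rw [hamt,
          show pvTail streams (f + 1) nidx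
            = pvRound streams nidx ++ pvTail streams f (nidx + 1) from rfl,
          List.take_append, pvRecount_append]
    · have h0 : (m - (sel.length : Int)).toNat = 0 := by omega
      simp [pvOuterA, hlt, h0, pvRecount]

theorem pvCountsInit (l : List pvStream) :
    ∀ k, (l.foldl (fun d s => d.insert (s.1, s.2.1) (0 : Int)) PySem.Dict.empty).getD k 0 = 0 := by
  suffices h : ∀ (d : PySem.Dict pvKey Int), (∀ k, d.getD k 0 = 0) →
      ∀ k, (l.foldl (fun d s => d.insert (s.1, s.2.1) (0 : Int)) d).getD k 0 = 0 by
    exact h PySem.Dict.empty (fun k => by simp [pysem])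
  induction l with
  | nil => intro d hd k; exact hd k
  | cons s t ih =>
    intro d hd k
    simp only [List.foldl_cons]
    refine ih _ (fun k' => ?_) k
    rw [PySem.Dict.getD_insert]
    split <;> simp [hd]

-- B side: bucketing one stream appends its entry to buckets 0 … len-1
theorem pvAddStream_inner (rid dev : Option String) (L : Int) :
    ∀ (tail : List pvWin) (st : Nat) (bk : List (List pvE)), st + tail.length ≤ bk.length →
      ((PySem.List.enumerate tail (st : Int)).foldl
        (fun bk iw => bk.set iw.1.toNat (bk.getD iw.1.toNat [] ++ [(rid, dev, iw.1, iw.2, L)])) bk).length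
        = bk.length
      ∧ ∀ j, ((PySem.List.enumerate tail (st : Int)).foldl
          (fun bk iw => bk.set iw.1.toNat (bk.getD iw.1.toNat [] ++ [(rid, dev, iw.1, iw.2, L)])) bk).getD j []
        = if st ≤ j ∧ j < st + tail.length
            then bk.getD j [] ++ [(rid, dev, (j : Int), tail.getD (j - st) [], L)]
            else bk.getD j [] := by
  intro tail
  induction tail with
  | nil =>
    intro st bk _
    refine ⟨rfl, fun j => ?_⟩
    show bk.getD j [] = _
    simp only [List.length_nil]
    rw [if_neg (by omega)]
  | cons w tws ih =>
    intro st bk hle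
    simp only [List.length_cons] at hle
    have hen : PySem.List.enumerate (w :: tws) (st : Int)
        = ((st : Int), w) :: PySem.List.enumerate tws (((st + 1 : Nat)) : Int) := by
      simp [PySem.List.enumerate]
    rw [hen]
    simp only [List.foldl_cons, Int.toNat_natCast]
    obtain ⟨ihlen, ihchar⟩ := ih (st + 1)
      (bk.set st (bk.getD st [] ++ [(rid, dev, (st : Int), w, L)]))
      (by simp only [List.length_set]; omega)
    refine ⟨by rw [ihlen]; simp, fun j => ?_⟩
    rw [ihchar j]
    have hstlt : st < bk.length := by omega
    by_cases hj : j = st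
    · subst hj
      rw [if_neg (by omega)]
      have hget : (bk.set j (bk.getD j [] ++ [(rid, dev, (j : Int), w, L)])).getD j []
          = bk.getD j [] ++ [(rid, dev, (j : Int), w, L)] := by
        simp [List.getD, hstlt]
      rw [hget, if_pos (by simp only [List.length_cons]; omega)]
      simp
    · have hne : j ≠ st := hj
      have hset : (bk.set st (bk.getD st [] ++ [(rid, dev, (st : Int), w, L)])).getD j []
          = bk.getD j [] := by
        simp [List.getD, List.getElem?_set_ne (fun h => hne h.symm)]
      rw [hset]
      by_cases hin : st + 1 ≤ j ∧ j < st + 1 + tws.length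
      · rw [if_pos hin, if_pos (by simp only [List.length_cons]; omega)]
        have hsub : j - st = (j - (st + 1)) + 1 := by omega
        rw [hsub, List.getD_cons_succ]
      · rw [if_neg hin, if_neg (by simp only [List.length_cons]; omega)]

theorem pvRound_append (l1 l2 : List pvStream) (j : Nat) :
    pvRound (l1 ++ l2) j = pvRound l1 j ++ pvRound l2 j := by
  simp [pvRound, List.filter_append]

theorem pvRound_single (rid dev : Option String) (ws : List pvWin) (j : Nat) :
    pvRound [(rid, dev, ws)] j
      = if j < ws.length then [(rid, dev, (j : Int), ws.getD j [], (ws.length : Int))] else [] := by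
  by_cases h : j < ws.length <;> simp [pvRound, h]

theorem pvMaxLen_aux : ∀ (l : List pvStream) (init : Nat),
    init ≤ l.foldl (fun m s => Nat.max m s.2.2.length) init
    ∧ ∀ s ∈ l, s.2.2.length ≤ l.foldl (fun m s => Nat.max m s.2.2.length) init := by
  intro l
  induction l with
  | nil => intro init; exact ⟨le_refl _, by simp⟩
  | cons h t ih =>
    intro init
    simp only [List.foldl_cons]
    obtain ⟨h1, h2⟩ := ih (Nat.max init h.2.2.length)
    refine ⟨le_trans (Nat.le_max_left _ _) h1, ?_⟩
    intro s hs
    rcases List.mem_cons.mp hs with rfl | hs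
    · exact le_trans (Nat.le_max_right _ _) h1
    · exact h2 s hs

-- the bucket fold maintains: bucket j = round j of the processed prefix
theorem pvBuckets_spec (M : Nat) :
    ∀ (l2 l1 : List pvStream) (bk : List (List pvE)),
      bk.length = M → (∀ s ∈ l2, s.2.2.length ≤ M) →
      (∀ j, bk.getD j [] = pvRound l1 j) →
      (l2.foldl pvAddStream bk).length = M
      ∧ ∀ j, (l2.foldl pvAddStream bk).getD j [] = pvRound (l1 ++ l2) j := by
  intro l2
  induction l2 with
  | nil =>
    intro l1 bk hlen _ hchar
    exact ⟨hlen, fun j => by simpa using hchar j⟩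
  | cons s t ih =>
    intro l1 bk hlen hts hchar
    rcases s with ⟨rid, dev, ws⟩
    have hwsM : ws.length ≤ M := hts _ (List.mem_cons_self)
    have hfold : pvAddStream bk (rid, dev, ws)
        = (PySem.List.enumerate ws (((0 : Nat)) : Int)).foldl
            (fun bk iw => bk.set iw.1.toNat (bk.getD iw.1.toNat []
              ++ [(rid, dev, iw.1, iw.2, (ws.length : Int))])) bk := by
      simp [pvAddStream]
    obtain ⟨blen, bchar⟩ := pvAddStream_inner rid dev (ws.length : Int) ws 0 bk
      (by omega)
    have hlen' : (pvAddStream bk (rid, dev, ws)).length = M := by rw [hfold, blen, hlen]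
    have hchar' : ∀ j, (pvAddStream bk (rid, dev, ws)).getD j []
        = pvRound (l1 ++ [(rid, dev, ws)]) j := by
      intro j
      rw [hfold, bchar j, pvRound_append, hchar j, pvRound_single]
      by_cases hjw : j < ws.length
      · rw [if_pos (by omega), if_pos hjw]; simp
      · rw [if_neg (by omega), if_neg hjw, List.append_nil]
    obtain ⟨rlen, rchar⟩ := ih (l1 ++ [(rid, dev, ws)]) (pvAddStream bk (rid, dev, ws))
      hlen' (fun s hs => hts s (List.mem_cons_of_mem _ hs)) hchar'
    refine ⟨rlen, fun j => ?_⟩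
    rw [show l1 ++ (rid, dev, ws) :: t = (l1 ++ [(rid, dev, ws)]) ++ t by simp]
    exact rchar j

-- flattening buckets whose j-th entry is round (n+j) gives the tail of rounds from n
theorem pvFlatten_tail (wbs : List pvStream) :
    ∀ (bks : List (List pvE)) (n : Nat),
      (∀ j, bks.getD j [] = pvRound wbs (n + j)) →
      bks.flatten = pvTail wbs bks.length n := by
  intro bks
  induction bks with
  | nil => intro n _; rfl
  | cons b bs ih =>
    intro n hb
    show b ++ bs.flatten = pvRound wbs n ++ pvTail wbs bs.length (n + 1)
    have h0 := hb 0
    simp only [List.getD_cons_zero, Nat.add_zero] at h0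
    rw [h0, ih (n + 1) (fun j => by
      have := hb (j + 1)
      simpa [Nat.add_comm, Nat.add_assoc, Nat.add_left_comm] using this)]

theorem pvTail_add_last (l : List pvStream) :
    ∀ (f n : Nat), pvTail l (f + 1) n = pvTail l f n ++ pvRound l (n + f) := by
  intro f
  induction f with
  | zero => intro n; simp [pvTail]
  | succ f ih =>
    intro n
    show pvRound l n ++ pvTail l (f + 1) (n + 1) = (pvRound l n ++ pvTail l f (n + 1)) ++ _
    rw [show n + (f + 1) = (n + 1) + f from by omega, ih (n + 1), List.append_assoc]

-- ===== VERDICT (by name: the statement is the Claim_ definition above) =====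
theorem select_windows_round_robin_spec : Claim_equal_select_windows_round_robin := by
  intro wbs m _
  unfold Spec_select_windows_round_robin
  have hA : select_windows_round_robin wbs m
      = (pvRecount PySem.Dict.empty
          ((pvTail wbs (pvMaxLen wbs + 1) 0).take (m - (([] : List pvOut).length : Int)).toNat) []).2 := by
    unfold select_windows_round_robin
    exact pvOuterA_eq wbs m (pvMaxLen wbs + 1)
      (wbs.foldl (fun d s => d.insert (s.1, s.2.1) 0) PySem.Dict.empty) PySem.Dict.empty [] 0
      (fun k => by rw [pvCountsInit]; simp [pysem])
  have hMeq : pvMaxLen wbs = pvMaxLenB wbs := by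
    simp [pvMaxLen, pvMaxLenB, List.foldl_map]
  have hbound : ∀ s ∈ wbs, s.2.2.length ≤ pvMaxLenB wbs := by
    intro s hs
    exact hMeq ▸ (pvMaxLen_aux wbs 0).2 s hs
  obtain ⟨blen, bchar⟩ := pvBuckets_spec (pvMaxLenB wbs) wbs []
    (List.replicate (pvMaxLenB wbs) []) (by simp) hbound
    (fun j => by
      have hl : pvRound ([] : List pvStream) j = [] := rfl
      rw [hl]
      simp [List.getD, List.getElem?_replicate]
      split <;> rfl)
  have hflat : (wbs.foldl pvAddStream (List.replicate (pvMaxLenB wbs) [])).foldl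
        (fun acc b => acc ++ b) ([] : List pvE) = pvTail wbs (pvMaxLenB wbs) 0 := by
    rw [PySem.List.foldl_append_eq_flatten]
    simp only [List.nil_append]
    rw [pvFlatten_tail wbs _ 0 (fun j => by simpa using bchar j), blen]
  have hroundM : pvRound wbs (pvMaxLenB wbs) = [] := by
    unfold pvRound
    rw [List.map_eq_nil_iff, List.filter_eq_nil_iff]
    intro s hs
    simpa using Nat.not_lt.mpr (hbound s hs)
  have htail : pvTail wbs (pvMaxLen wbs + 1) 0 = pvTail wbs (pvMaxLenB wbs) 0 := by
    rw [hMeq, pvTail_add_last]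
    simp [hroundM]
  have hB : select_windows_round_robin_alt wbs m
      = (pvRecount PySem.Dict.empty
          (if 0 < m then
            PySem.List.slice ((wbs.foldl pvAddStream (List.replicate (pvMaxLenB wbs) [])).foldl
              (fun acc b => acc ++ b) ([] : List pvE)) none (some m)
          else []) []).2 := rfl
  rw [hA, htail, ← hflat, hB]
  congr 1
  by_cases hm : 0 < m
  · rw [if_pos hm, PySem.List.slice_to]
    · congr 1
      simp
    · exact hm.le
  · rw [if_neg hm]
    have h0 : (m - (([] : List pvOut).length : Int)).toNat = 0 := by simp; omega
    rw [h0, List.take_zero]
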